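-- pv_equiv track=rewrite | github.com/NoRiteshRohilla/DevsNest_Problems | MarioKart.py | solve
-- ===== SOURCE A (Python) =====
-- def solve(mat):
--     # CODE HERE
--     mat = dict(mat)
--     list1 = sorted(set(mat.values()))
--     a = list1[1]
--     keys = [k for k, v in mat.items() if v == a]
--     keys = sorted(keys)
--     ' '.join(str(e) for e in keys)
--     return keys
-- ===== SOURCE B (Python) =====
-- def solve(mat):
--     mat = dict(mat)
--     items = sorted(mat.items(), key=lambda kv: (kv[1], kv[0]))
--     i = 0
--     while i < len(items) and items[i][1] == items[0][1]:
--         i += 1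
--     a = items[i][1]
--     keys = []
--     while i < len(items) and items[i][1] == a:
--         keys.append(items[i][0])
--         i += 1
--     return keys
-- ===== Notes on version B (the rewrite author's own statement) =====
-- stated objective: alternative
-- what changed: B makes one lexicographic sort of the (key,value) items by (value, key) and then a linear index scan: it skips the leading block of the smallest value and collects the keys of the next block, instead of A's sorted(set(values)) + item-filter comprehension + second sort of the keys (A's dead ' '.join line is dropped).
import Mathlib
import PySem

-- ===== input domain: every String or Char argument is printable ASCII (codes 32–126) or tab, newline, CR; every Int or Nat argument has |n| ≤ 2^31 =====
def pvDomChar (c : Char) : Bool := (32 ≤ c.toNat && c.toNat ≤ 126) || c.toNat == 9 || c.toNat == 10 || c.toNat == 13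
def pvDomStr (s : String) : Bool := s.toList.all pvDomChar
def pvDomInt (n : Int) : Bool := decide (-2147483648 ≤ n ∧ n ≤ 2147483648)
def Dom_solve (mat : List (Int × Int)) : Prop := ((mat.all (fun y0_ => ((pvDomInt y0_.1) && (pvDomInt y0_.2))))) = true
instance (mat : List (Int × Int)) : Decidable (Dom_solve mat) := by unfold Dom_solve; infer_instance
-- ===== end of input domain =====

-- B replaces A's sorted(set(values)) + item-filter comprehension + key sort by ONE lexicographic
-- sort of the items by (value, key) followed by a linear scan that skips the first value block and
-- collects the keys of the second (objective: alternative; A's dead ' '.join line dropped).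

-- ===== PORT A =====
def solve (mat : List (Int × Int)) : List Int :=
  let d := PySem.Dict.ofList mat
  let list1 := PySem.List.sorted (PySem.Set.ofList d.values) (fun x => x) false
  let a := PySem.List.pyGetD list1 1 0   -- list1[1]; total form, Pre_solve guarantees the index is in range
  let keys := (d.items.filter (fun kv => kv.2 == a)).map (fun kv => kv.1)
  PySem.List.sorted keys (fun x => x) false

-- ===== PORT B =====
-- first while loop of Source B: advance past the leading block whose value equals v
def bSkip (v : Int) : List (Int × Int) → List (Int × Int)
  | [] => []
  | kv :: t => if kv.2 == v then bSkip v t else kv :: t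

-- second while loop of Source B: collect keys while the value equals a, stop at the first other value
def bCollect (a : Int) : List (Int × Int) → List Int
  | [] => []
  | kv :: t => if kv.2 == a then kv.1 :: bCollect a t else []

def solve_alt (mat : List (Int × Int)) : List Int :=
  let d := PySem.Dict.ofList mat
  let items := PySem.List.sorted2 d.items (fun kv => kv.2) (fun kv => kv.1) false
  match items with
  | [] => []              -- Python raises IndexError at items[0] here; excluded by Pre_solve
  | h :: _ =>
    let rest := bSkip h.2 items
    let a := (rest.headD (0, 0)).2   -- items[i][1]; total form, Pre_solve guarantees i < len(items)
    bCollect a rest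

-- ===== PRECONDITION & SPEC =====
-- Pre_ excludes exactly the inputs with fewer than two distinct values in dict(mat),
-- on which A raises IndexError at list1[1] (B raises IndexError there too).
def Pre_solve (mat : List (Int × Int)) : Prop :=
  2 ≤ (PySem.Set.ofList (PySem.Dict.ofList mat).values).length
instance (mat : List (Int × Int)) : Decidable (Pre_solve mat) := by unfold Pre_solve; infer_instance
def pvWitness_solve : (List (Int × Int)) := [(1, 5), (2, 7)]
def Spec_solve (mat : List (Int × Int)) (out : List Int) : Prop := out = solve_alt mat
instance (mat : List (Int × Int)) (out : List Int) : Decidable (Spec_solve mat out) := by unfold Spec_solve; infer_instance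

-- ===== CLAIM (what is proved, stated in full; the proofs are below) =====
def Claim_equal_solve : Prop := ∀ (mat : List (Int × Int)), Dom_solve mat → Pre_solve mat → Spec_solve mat (solve mat)

-- ===== LEMMAS AND PROOFS =====

-- strict lexicographic order on (key, value) pairs compared as (value, key)
def lexLt (a b : Int × Int) : Prop := a.2 < b.2 ∨ (a.2 = b.2 ∧ a.1 < b.1)

-- the Bool comparator sorted2 uses agrees with lexLt
theorem lt2_iff (a b : Int × Int) :
    ((decide (a.2 < b.2) || (!decide (b.2 < a.2) && decide (a.1 < b.1))) = true) ↔ lexLt a b := by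
  unfold lexLt; rcases a with ⟨k1, v1⟩; rcases b with ⟨k2, v2⟩; simp; omega

theorem insertBy_pairwise_lex (x : Int × Int) (ys : List (Int × Int))
    (h : ys.Pairwise (fun a b => ¬ lexLt b a)) :
    (PySem.List.insertBy
      (fun a b => decide (a.2 < b.2) || (!decide (b.2 < a.2) && decide (a.1 < b.1))) x ys).Pairwise
      (fun a b => ¬ lexLt b a) := by
  induction ys with
  | nil => simp [PySem.List.insertBy]
  | cons y t ih =>
    rw [PySem.List.insertBy]
    by_cases hb : (decide (x.2 < y.2) || (!decide (y.2 < x.2) && decide (x.1 < y.1))) = true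
    · rw [if_pos hb]
      rw [lt2_iff] at hb
      rcases List.pairwise_cons.mp h with ⟨hy, ht⟩
      refine List.pairwise_cons.mpr ⟨?_, h⟩
      intro z hz
      rcases List.mem_cons.mp hz with hz | hz
      · subst hz; unfold lexLt at hb ⊢; omega
      · have := hy z hz; unfold lexLt at hb this ⊢; omega
    · rw [if_neg hb]
      rcases List.pairwise_cons.mp h with ⟨hy, ht⟩
      refine List.pairwise_cons.mpr ⟨?_, ih ht⟩
      intro z hz
      rw [PySem.List.mem_insertBy] at hz
      rcases hz with hz | hz
      · subst hz
        intro hc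
        exact hb ((lt2_iff _ y).mpr hc)
      · exact hy z hz

theorem foldl_insertBy_pairwise_lex (xs acc : List (Int × Int))
    (h : acc.Pairwise (fun a b => ¬ lexLt b a)) :
    (xs.foldl (fun acc x => PySem.List.insertBy
      (fun a b => decide (a.2 < b.2) || (!decide (b.2 < a.2) && decide (a.1 < b.1))) x acc) acc).Pairwise
      (fun a b => ¬ lexLt b a) := by
  induction xs generalizing acc with
  | nil => exact h
  | cons x t ih => exact ih _ (insertBy_pairwise_lex x acc h)

-- the sorted2 result is the unique strictly-lex-increasing rearrangement
theorem sorted2_eq_of_perm_of_pairwise_lex (xs ys : List (Int × Int))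
    (hp : ys.Perm xs) (hs : ys.Pairwise lexLt) :
    PySem.List.sorted2 xs (fun kv => kv.2) (fun kv => kv.1) false = ys := by
  have hperm : (PySem.List.sorted2 xs (fun kv => kv.2) (fun kv => kv.1) false).Perm ys := by
    have h1 := PySem.List.foldl_insertBy_perm
      (fun a b : Int × Int => decide (a.2 < b.2) || (!decide (b.2 < a.2) && decide (a.1 < b.1))) xs []
    simp only [List.nil_append] at h1
    exact (h1.trans hp.symm)
  have hs1 : (PySem.List.sorted2 xs (fun kv => kv.2) (fun kv => kv.1) false).Pairwise
      (fun a b => ¬ lexLt b a) :=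
    foldl_insertBy_pairwise_lex xs [] (List.Pairwise.nil)
  have hs2 : ys.Pairwise (fun a b : Int × Int => ¬ lexLt b a) := by
    refine hs.imp ?_
    intro a b hab; unfold lexLt at hab ⊢; omega
  refine List.Perm.eq_of_pairwise ?_ hs1 hs2 hperm
  intro a b _ _ h1 h2
  unfold lexLt at h1 h2
  rcases a with ⟨k1, v1⟩; rcases b with ⟨k2, v2⟩
  simp at h1 h2 ⊢
  omega

-- partitioning a list by its (distinct, exhaustive) values is a permutation of it
theorem partition_perm (ws : List Int) (l : List (Int × Int)) (hnd : ws.Nodup)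
    (hv : ∀ x ∈ l, x.2 ∈ ws) :
    (ws.flatMap (fun v => l.filter (fun x => x.2 == v))).Perm l := by
  induction ws generalizing l with
  | nil =>
    cases l with
    | nil => simp
    | cons x t => exact absurd (hv x (by simp)) (by simp)
  | cons v ws ih =>
    rw [List.flatMap_cons]
    have hne : v ∉ ws := (List.nodup_cons.mp hnd).1
    have hstep : ∀ w ∈ ws, l.filter (fun x => x.2 == w)
        = (l.filter (fun x => !(x.2 == v))).filter (fun x => x.2 == w) := by
      intro w hw
      rw [List.filter_filter]
      apply List.filter_congr
      intro x _
      by_cases hx : x.2 = w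
      · subst hx
        have hxv : ¬ (x.2 = v) := by rintro rfl; exact hne hw
        simp [hxv]
      · simp [hx]
    have hmap : ws.flatMap (fun w => l.filter (fun x => x.2 == w))
        = ws.flatMap (fun w => (l.filter (fun x => !(x.2 == v))).filter (fun x => x.2 == w)) := by
      apply List.flatMap_congr
      intro w hw
      exact hstep w hw
    rw [hmap]
    have hv' : ∀ x ∈ l.filter (fun x => !(x.2 == v)), x.2 ∈ ws := by
      intro x hx
      rw [List.mem_filter] at hx
      have := hv x hx.1
      simp at hx
      simpa [hx.2] using this
    have := ih (l.filter (fun x => !(x.2 == v))) (List.nodup_cons.mp hnd).2 hv'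
    exact (this.append_left (l.filter (fun x => x.2 == v))).trans (List.filter_append_perm _ l)

-- proof-only abbreviations: the sorted keys carrying value v, and the corresponding item block
def keysOf (l : List (Int × Int)) (v : Int) : List Int :=
  PySem.List.sorted ((l.filter (fun kv => kv.2 == v)).map (fun kv => kv.1)) (fun x => x) false

def block (l : List (Int × Int)) (v : Int) : List (Int × Int) :=
  (keysOf l v).map (fun k => (k, v))

theorem mem_block_snd (l : List (Int × Int)) (v : Int) (x : Int × Int) (hx : x ∈ block l v) :
    x.2 = v := by
  unfold block at hx
  rcases List.mem_map.mp hx with ⟨k, _, rfl⟩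
  rfl

theorem block_perm_filter (l : List (Int × Int)) (v : Int) :
    (block l v).Perm (l.filter (fun x => x.2 == v)) := by
  unfold block keysOf
  have h1 := (PySem.List.sorted_perm ((l.filter (fun kv => kv.2 == v)).map (fun kv => kv.1))
    (fun x => x) false).map (fun k => (k, v))
  refine h1.trans ?_
  rw [List.map_map]
  have : ∀ x ∈ l.filter (fun kv => kv.2 == v), ((fun k => (k, v)) ∘ fun kv => kv.1) x = id x := by
    intro x hx
    have := (List.mem_filter.mp hx).2
    simp at this
    simp [Function.comp, ← this]
  rw [List.map_congr_left this, List.map_id]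

theorem block_ne_nil (l : List (Int × Int)) (v : Int) (hv : v ∈ l.map (fun x => x.2)) :
    block l v ≠ [] := by
  unfold block keysOf
  rcases List.mem_map.mp hv with ⟨x, hx, rfl⟩
  simp only [ne_eq, List.map_eq_nil_iff, PySem.List.sorted_eq_nil_iff, List.filter_eq_nil_iff]
  intro h
  exact absurd (h x hx) (by simp)

theorem nodup_keysOf (l : List (Int × Int)) (v : Int) (hk : (l.map (fun x => x.1)).Nodup) :
    (keysOf l v).Nodup := by
  unfold keysOf
  have hp := PySem.List.sorted_perm ((l.filter (fun kv => kv.2 == v)).map (fun kv => kv.1))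
    (fun x : Int => x) false
  have hs : ((l.filter (fun kv => kv.2 == v)).map (fun kv => kv.1)).Sublist
      (l.map (fun kv => kv.1)) :=
    List.Sublist.map (fun kv => kv.1) (l.filter_sublist (p := fun kv => kv.2 == v))
  exact hp.nodup_iff.mpr (hs.nodup hk)

theorem pairwise_lt_keysOf (l : List (Int × Int)) (v : Int) (hk : (l.map (fun x => x.1)).Nodup) :
    (keysOf l v).Pairwise (· < ·) := by
  have h1 : (keysOf l v).Pairwise (fun a b => a ≤ b) := by
    unfold keysOf
    exact PySem.List.sorted_pairwise _ (fun x => x)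
  have h2 : (keysOf l v).Pairwise (· ≠ ·) := nodup_keysOf l v hk
  exact (h1.and h2).imp (fun h => lt_of_le_of_ne h.1 h.2)

theorem flatMap_blocks_perm (vs : List Int) (l : List (Int × Int)) (hnd : vs.Nodup)
    (hv : ∀ x ∈ l, x.2 ∈ vs) : (vs.flatMap (block l)).Perm l := by
  have h1 : (vs.flatMap (block l)).Perm (vs.flatMap (fun v => l.filter (fun x => x.2 == v))) := by
    clear hnd hv
    induction vs with
    | nil => simp
    | cons v ws ih => simpa using (block_perm_filter l v).append ih
  exact h1.trans (partition_perm vs l hnd hv)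

theorem pairwise_flatMap_blocks (vs : List Int) (l : List (Int × Int))
    (hvs : vs.Pairwise (· < ·)) (hk : (l.map (fun x => x.1)).Nodup) :
    (vs.flatMap (block l)).Pairwise lexLt := by
  rw [List.flatMap_def, List.pairwise_flatten]
  constructor
  · intro b hb
    rcases List.mem_map.mp hb with ⟨v, _, rfl⟩
    unfold block
    rw [List.pairwise_map]
    exact (pairwise_lt_keysOf l v hk).imp (fun h => Or.inr ⟨rfl, h⟩)
  · rw [List.pairwise_map]
    refine hvs.imp ?_
    intro v v' hvv' x hx y hy
    have hxv := mem_block_snd l v x hx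
    have hyv := mem_block_snd l v' y hy
    exact Or.inl (by omega)

-- bSkip drops exactly the leading block of value v
theorem bSkip_block_append (v : Int) (b r : List (Int × Int))
    (hb : ∀ x ∈ b, x.2 = v) (hr : ∀ x ∈ r, x.2 ≠ v) : bSkip v (b ++ r) = r := by
  induction b with
  | nil =>
    cases r with
    | nil => rfl
    | cons y t =>
      simp only [List.nil_append, bSkip]
      rw [if_neg (by simpa using hr y (by simp))]
  | cons x b ih =>
    simp only [List.cons_append, bSkip]
    rw [if_pos (by simp [hb x (by simp)])]
    exact ih (fun y hy => hb y (by simp [hy]))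

-- bCollect collects exactly the keys of the leading block of value a
theorem bCollect_block_append (a : Int) (b r : List (Int × Int))
    (hb : ∀ x ∈ b, x.2 = a) (hr : ∀ x ∈ r, x.2 ≠ a) :
    bCollect a (b ++ r) = b.map (fun x => x.1) := by
  induction b with
  | nil =>
    cases r with
    | nil => rfl
    | cons y t =>
      simp only [List.nil_append, bCollect]
      rw [if_neg (by simpa using hr y (by simp))]
      rfl
  | cons x b ih =>
    simp only [List.cons_append, bCollect]
    rw [if_pos (by simp [hb x (by simp)])]
    rw [ih (fun y hy => hb y (by simp [hy]))]
    simp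

theorem two_le_length_eq (l : List Int) (h : 2 ≤ l.length) : ∃ a b t, l = a :: b :: t := by
  match l with
  | a :: b :: t => exact ⟨a, b, t, rfl⟩
  | [] => simp at h
  | [a] => simp at h

-- ===== VERDICT (by name: the statement is the Claim_ definition above) =====
theorem solve_spec : Claim_equal_solve := by
  intro mat _ hpre
  unfold Spec_solve
  unfold Pre_solve at hpre
  have hk : ((PySem.Dict.ofList mat).items.map (fun x => x.1)).Nodup := by
    have := PySem.Dict.nodup_keys_ofList mat
    simpa [PySem.Dict.keys] using this
  set l := (PySem.Dict.ofList mat).items with hl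
  have hvals : (PySem.Dict.ofList mat).values = l.map (fun x => x.2) := PySem.Dict.values.eq_1 _
  set vs := PySem.List.sorted (PySem.Set.ofList ((PySem.Dict.ofList mat).values)) (fun x => x) false with hvsdef
  have hvs_lt : vs.Pairwise (· < ·) := PySem.List.sorted_ofList_pairwise_lt _
  have hvs_nodup : vs.Nodup :=
    (PySem.List.sorted_perm _ _ _).nodup_iff.mpr (PySem.Set.nodup_ofList _)
  have hlen : 2 ≤ vs.length := by rw [hvsdef, PySem.List.length_sorted]; exact hpre
  have hmemvs : ∀ v, v ∈ vs ↔ v ∈ l.map (fun x => x.2) := by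
    intro v
    rw [hvsdef, PySem.List.mem_sorted, PySem.Set.mem_ofList, hvals]
  obtain ⟨v0, v1, t, hv⟩ := two_le_length_eq vs hlen
  rw [hv] at hvs_lt hvs_nodup
  rcases List.pairwise_cons.mp hvs_lt with ⟨h01, h1t'⟩
  rcases List.pairwise_cons.mp h1t' with ⟨h1t, _⟩
  have hm0 : v0 ∈ l.map (fun x => x.2) := (hmemvs v0).mp (by rw [hv]; simp)
  have hm1 : v1 ∈ l.map (fun x => x.2) := (hmemvs v1).mp (by rw [hv]; simp)
  have hcover : ∀ x ∈ l, x.2 ∈ v0 :: v1 :: t := by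
    intro x hx
    rw [← hv]
    exact (hmemvs x.2).mpr (List.mem_map_of_mem hx)
  have hL : PySem.List.sorted2 l (fun kv => kv.2) (fun kv => kv.1) false
      = block l v0 ++ (block l v1 ++ t.flatMap (block l)) := by
    have hp := flatMap_blocks_perm (v0 :: v1 :: t) l hvs_nodup hcover
    have hs := pairwise_flatMap_blocks (v0 :: v1 :: t) l hvs_lt hk
    have h := sorted2_eq_of_perm_of_pairwise_lex l ((v0 :: v1 :: t).flatMap (block l)) hp hs
    simpa [List.flatMap_cons] using h
  obtain ⟨p0, b0, hb0⟩ := List.exists_cons_of_ne_nil (block_ne_nil l v0 hm0)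
  obtain ⟨p1, b1, hb1⟩ := List.exists_cons_of_ne_nil (block_ne_nil l v1 hm1)
  have hp0 : p0.2 = v0 := mem_block_snd l v0 p0 (by rw [hb0]; simp)
  have hp1 : p1.2 = v1 := mem_block_snd l v1 p1 (by rw [hb1]; simp)
  have hskip : bSkip v0 (block l v0 ++ (block l v1 ++ t.flatMap (block l)))
      = block l v1 ++ t.flatMap (block l) := by
    apply bSkip_block_append
    · exact fun x hx => mem_block_snd l v0 x hx
    · intro x hx
      rcases List.mem_append.mp hx with hx | hx
      · have h1 := mem_block_snd l v1 x hx
        have h2 := h01 v1 (by simp)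
        omega
      · rcases List.mem_flatMap.mp hx with ⟨v', hv', hxv'⟩
        have h1 := mem_block_snd l v' x hxv'
        have h2 := h01 v' (by simp [hv'])
        omega
  have hcol : bCollect v1 (block l v1 ++ t.flatMap (block l))
      = (block l v1).map (fun x => x.1) := by
    apply bCollect_block_append
    · exact fun x hx => mem_block_snd l v1 x hx
    · intro x hx
      rcases List.mem_flatMap.mp hx with ⟨v', hv', hxv'⟩
      have h1 := mem_block_snd l v' x hxv'
      have h2 := h1t v' hv'
      omega
  have hmapfst : (block l v1).map (fun x => x.1) = keysOf l v1 := by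
    unfold block
    rw [List.map_map]
    simp [Function.comp_def]
  have halt : solve_alt mat = keysOf l v1 := by
    simp only [solve_alt, ← hl, hL, hb0, List.cons_append]
    rw [← List.cons_append, ← hb0, hp0, hskip, hb1]
    simp only [List.cons_append, List.headD_cons, hp1]
    rw [← List.cons_append, ← hb1, hcol, hmapfst]
  have ha : solve mat = keysOf l v1 := by
    simp only [solve, ← hl, ← hvsdef, hv, PySem.List.pyGetD_ofNat']
    simp only [List.getD_cons_succ, List.getD_cons_zero]
    rfl
  rw [ha, halt]
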